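-- pv_equiv track=rewrite | github.com/mockupsoft/mgx-ai | mgx_agent/actions.py | _extract_main_code
-- ===== SOURCE A (Python) =====
-- from typing import Any, Dict, List, Optional, Tuple
--
-- def _extract_main_code(files: List[Tuple[str, str]], language: str) -> Optional[str]:
--     """
--     Extract main code file content for sandbox execution.
--
--     Args:
--         files: List of (filepath, content) tuples
--         language: Programming language
--
--     Returns:
--         Main code content or None
--     """
--     # Language-specific main file patterns
--     main_patterns = {
--         'python': ['main.py', 'app.py', 'index.py', 'server.py', '__main__.py'],
--         'javascript': ['main.js', 'app.js', 'index.js', 'server.js', 'app.js'],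
--         'php': ['index.php', 'main.php', 'app.php', 'server.php'],
--     }
--
--     # Look for main files
--     main_files = []
--     for file_path, content in files:
--         file_name = file_path.split('/')[-1]
--         if file_name in main_patterns.get(language, []):
--             main_files.append((file_path, content))
--
--     # If no main files found, take the first non-test file
--     if not main_files:
--         for file_path, content in files:
--             if not any(test_indicator in file_path.lower()
--                       for test_indicator in ['test_', '_test.', 'spec.', '.test.', '.spec.']):
--                 main_files.append((file_path, content))
--                 break
--
--     # Return the content of the first main file
--     if main_files:
--         return main_files[0][1]
--
--     return None
-- ===== SOURCE B (Python) =====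
-- from typing import List, Optional, Tuple
--
-- def _extract_main_code(files: List[Tuple[str, str]], language: str) -> Optional[str]:
--     """Single pass: return the first main file immediately; remember the first
--     non-test file as fallback (boolean flag, since content may be '')."""
--     main_patterns = {
--         'python': ['main.py', 'app.py', 'index.py', 'server.py', '__main__.py'],
--         'javascript': ['main.js', 'app.js', 'index.js', 'server.js', 'app.js'],
--         'php': ['index.php', 'main.php', 'app.php', 'server.php'],
--     }
--     patterns = set(main_patterns.get(language, []))
--     test_indicators = ['test_', '_test.', 'spec.', '.test.', '.spec.']
--     fallback = None
--     fallback_found = False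
--     for file_path, content in files:
--         if file_path.split('/')[-1] in patterns:
--             return content
--         if not fallback_found and not any(t in file_path.lower() for t in test_indicators):
--             fallback = content
--             fallback_found = True
--     return fallback if fallback_found else None
-- ===== Notes on version B (the rewrite author's own statement) =====
-- stated objective: simpler
-- what changed: Replaces A's two sequential loops plus intermediate main_files list (collect ALL matching main files, then conditionally scan again for a non-test fallback, then take the head) by a single early-returning pass that returns the first main file immediately and records the first non-test file under a boolean flag as fallback.
import Mathlib
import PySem

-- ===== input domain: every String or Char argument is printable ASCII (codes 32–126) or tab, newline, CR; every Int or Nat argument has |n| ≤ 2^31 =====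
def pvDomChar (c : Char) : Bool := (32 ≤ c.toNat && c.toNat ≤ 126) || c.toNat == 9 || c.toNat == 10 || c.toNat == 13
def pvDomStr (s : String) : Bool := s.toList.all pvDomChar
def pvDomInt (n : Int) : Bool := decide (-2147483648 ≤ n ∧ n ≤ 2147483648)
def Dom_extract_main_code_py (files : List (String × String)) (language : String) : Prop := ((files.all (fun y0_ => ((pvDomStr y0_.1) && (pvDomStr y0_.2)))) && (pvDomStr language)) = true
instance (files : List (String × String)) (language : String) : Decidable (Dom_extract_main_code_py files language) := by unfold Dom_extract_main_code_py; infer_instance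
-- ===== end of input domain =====

-- B is a single early-returning pass with a fallback flag instead of A's two loops + intermediate list; return value only, no mutation.

-- ===== PORT A =====
-- main_patterns dict (shared constant of both Pythons)
def pvMainPatterns : PySem.Dict String (List String) :=
  PySem.Dict.ofList
    [("python", ["main.py", "app.py", "index.py", "server.py", "__main__.py"]),
     ("javascript", ["main.js", "app.js", "index.js", "server.js", "app.js"]),
     ("php", ["index.php", "main.php", "app.php", "server.php"])]

-- file_path.split('/')[-1]  (split('/') is never empty, so [-1] is getLast)
def pvFileName (fp : String) : String := ((PySem.Str.split? fp "/").getD []).getLastD ""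

-- any(test_indicator in file_path.lower() for test_indicator in [...])
def pvIsTest (fp : String) : Bool :=
  (["test_", "_test.", "spec.", ".test.", ".spec."] : List String).any
    (fun t => PySem.Str.isIn t (PySem.Str.lower fp))

def extract_main_code_py (files : List (String × String)) (language : String) : Option String :=
  let pats := pvMainPatterns.getD language []
  -- first loop: collect all main files
  let main_files := files.foldl
    (fun acc p => if pats.contains (pvFileName p.1) then acc ++ [p] else acc) []
  -- second loop (with break): first non-test file, only when no main file found
  let main_files :=
    if main_files = [] then
      match files.find? (fun p => !(pvIsTest p.1)) with
      | some p => [p]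
      | none => []
    else main_files
  match main_files with
  | m :: _ => some m.2
  | [] => none

-- ===== PORT B =====
-- single pass: Option String plays the role of (fallback_found, fallback)
def pvAltGo (pats : List String) (files : List (String × String)) (fallback : Option String) : Option String :=
  match files with
  | [] => fallback
  | p :: rest =>
    if pats.contains (pvFileName p.1) then some p.2
    else pvAltGo pats rest
      (if fallback.isNone && !(pvIsTest p.1) then some p.2 else fallback)

def extract_main_code_py_alt (files : List (String × String)) (language : String) : Option String :=
  pvAltGo (pvMainPatterns.getD language []) files none

-- ===== PRECONDITION & SPEC =====
def Spec_extract_main_code_py (files : List (String × String)) (language : String) (out : Option String) : Prop := out = extract_main_code_py_alt files language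
instance (files : List (String × String)) (language : String) (out : Option String) : Decidable (Spec_extract_main_code_py files language out) := by unfold Spec_extract_main_code_py; infer_instance

-- ===== CLAIM (what is proved, stated in full; the proofs are below) =====
def Claim_equal_extract_main_code_py : Prop := ∀ (files : List (String × String)) (language : String), Dom_extract_main_code_py files language → Spec_extract_main_code_py files language (extract_main_code_py files language)

-- ===== LEMMAS AND PROOFS =====

-- B's loop characterised: first main file wins, else the remembered / first non-test fallback
theorem pvAltGo_eq (pats : List String) (files : List (String × String)) (fb : Option String) :
    pvAltGo pats files fb =
      match files.filter (fun p => pats.contains (pvFileName p.1)) with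
      | m :: _ => some m.2
      | [] =>
        match fb with
        | some c => some c
        | none => (files.find? (fun p => !(pvIsTest p.1))).map (·.2) := by
  induction files generalizing fb with
  | nil => cases fb <;> simp [pvAltGo]
  | cons p rest ih =>
    cases hm : pats.contains (pvFileName p.1) with
    | true => simp only [pvAltGo, List.filter_cons, hm, if_pos]
    | false =>
      simp only [pvAltGo, List.filter_cons, hm, Bool.false_eq_true, if_false, ih]
      cases fb with
      | some c =>
        simp only [Option.isNone_some, Bool.false_and, Bool.false_eq_true, if_false]
      | none =>
        cases ht : pvIsTest p.1 <;>
          simp only [Option.isNone_none, Bool.true_and, ht, Bool.not_false, Bool.not_true,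
            List.find?_cons, Bool.false_eq_true, if_true, if_false] <;>
          cases rest.filter (fun p => pats.contains (pvFileName p.1)) <;> simp

-- A's first loop is a filter
theorem fold_filter (pats : List String) (files : List (String × String)) (acc : List (String × String)) :
    files.foldl (fun acc p => if pats.contains (pvFileName p.1) then acc ++ [p] else acc) acc
      = acc ++ files.filter (fun p => pats.contains (pvFileName p.1)) := by
  induction files generalizing acc with
  | nil => simp
  | cons p rest ih =>
    cases h : pats.contains (pvFileName p.1) with
    | true => simp only [List.foldl_cons, List.filter_cons, h, if_pos, ih]; simp
    | false => simp only [List.foldl_cons, List.filter_cons, h, Bool.false_eq_true, if_false, ih]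

-- A's tail (conditional fallback then head) against B's shape, predicates abstracted
theorem glue (F : List (String × String)) (nt : Option (String × String)) :
    (match (if F = [] then (match nt with | some p => [p] | none => []) else F) with
     | m :: _ => some m.2
     | [] => none)
    = (match F with
       | m :: _ => some m.2
       | [] => nt.map (·.2)) := by
  cases F <;> cases nt <;> simp

-- ===== VERDICT (by name: the statement is the Claim_ definition above) =====
theorem extract_main_code_py_spec : Claim_equal_extract_main_code_py := by
  intro files language _
  show extract_main_code_py files language = extract_main_code_py_alt files language
  unfold extract_main_code_py extract_main_code_py_alt
  show (match (if (files.foldl (fun acc p => if (pvMainPatterns.getD language []).contains (pvFileName p.1) then acc ++ [p] else acc) []) = [] then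
          (match files.find? (fun p => !(pvIsTest p.1)) with | some p => [p] | none => []) else
          (files.foldl (fun acc p => if (pvMainPatterns.getD language []).contains (pvFileName p.1) then acc ++ [p] else acc) [])) with
        | m :: _ => some m.2
        | [] => none)
    = pvAltGo (pvMainPatterns.getD language []) files none
  rw [pvAltGo_eq, fold_filter]
  simp only [List.nil_append]
  exact glue _ _
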